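-- pv_equiv track=rewrite | github.com/jenu8628/TIL | algorithm/캐치/3번.py | solution
-- ===== SOURCE A (Python) =====
-- def solution(s):
--     answer = []
--     for i in range(len(s)):
--         check = ""
--         for j in range(i+1, len(s)+1):
--             if s[j-1] in check:
--                 break
--             if s[i:j] not in answer:
--                 answer.append(s[i:j])
--             check = s[i:j]
--     return answer
-- ===== SOURCE B (Python) =====
-- def solution(s):
--     # Two staged passes instead of A's stateful scan: generate every
--     # substring whose characters are all distinct (stateless whole-substring
--     # set test, no incremental `check`, no break; no candidate can be longer
--     # than the number of distinct characters of s, which bounds j), then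
--     # deduplicate keeping first occurrences with dict.fromkeys.
--     n = len(s)
--     k = len(set(s))
--     subs = [s[i:j] for i in range(n) for j in range(i + 1, min(n, i + k) + 1)
--             if len(set(s[i:j])) == j - i]
--     return list(dict.fromkeys(subs))
-- ===== Notes on version B (the rewrite author's own statement) =====
-- stated objective: faster
-- what changed: Replaces A's stateful scan (incremental `check` string, early break, linear `sub not in answer` scan inside the loop) by two stateless stages: a comprehension collecting every substring that passes a whole-substring set-based distinctness test (with j bounded by i + len(set(s)), since no all-distinct substring can be longer than the alphabet of s), then dict.fromkeys to deduplicate keeping first occurrences.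
import Mathlib
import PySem

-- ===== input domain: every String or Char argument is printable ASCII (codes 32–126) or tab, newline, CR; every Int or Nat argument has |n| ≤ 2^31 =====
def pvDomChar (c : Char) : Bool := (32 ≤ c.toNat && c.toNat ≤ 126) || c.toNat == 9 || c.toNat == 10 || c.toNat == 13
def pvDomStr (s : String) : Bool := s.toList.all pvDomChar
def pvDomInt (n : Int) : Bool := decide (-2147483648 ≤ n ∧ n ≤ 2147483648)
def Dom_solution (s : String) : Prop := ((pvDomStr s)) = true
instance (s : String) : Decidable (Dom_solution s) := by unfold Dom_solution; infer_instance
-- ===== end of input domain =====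

-- B replaces A's stateful scan (incremental `check`, early break, membership test inside the
-- loop) by two stateless stages: collect every all-distinct-character substring, then
-- deduplicate keeping first occurrences; same ordered result.


-- ===== PORT A =====
-- inner `for j in range(i+1, len(s)+1)` loop with its early `break`
def solutionInner (s : String) (i : Int) (js : List Int) (check : String) (answer : List String) : List String :=
  match js with
  | [] => answer
  | j :: rest =>
    match PySem.Str.pyGet? s (j - 1) with
    | none => answer   -- IndexError: unreachable, j - 1 is always in range for j from this loop's range
    | some c =>
      if PySem.Str.isIn (String.ofList [c]) check then answer   -- `if s[j-1] in check: break`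
      else
        let sub := PySem.Str.slice s (some i) (some j)
        let answer' := if sub ∉ answer then answer ++ [sub] else answer
        solutionInner s i rest sub answer'

def solution (s : String) : List String :=
  (PySem.List.pyRange 0 (PySem.Str.len s)).foldl
    (fun answer i =>
      solutionInner s i (PySem.List.pyRange (i + 1) (PySem.Str.len s + 1)) "" answer) []

-- ===== PORT B =====
-- the comprehension `[s[i:j] for i in range(n) for j in range(i+1, n+1) if len(set(s[i:j])) == j - i]`
-- and then `list(dict.fromkeys(subs))` (= PySem.List.dedup)
def solution_alt (s : String) : List String :=
  let n := PySem.Str.len s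
  let k := PySem.Set.len (PySem.Set.ofList s.toList)
  let subs := (PySem.List.pyRange 0 n).flatMap (fun i =>
    (PySem.List.pyRange (i + 1) (min n (i + k) + 1)).filterMap (fun j =>
      let sub := PySem.Str.slice s (some i) (some j)
      if (PySem.Set.len (PySem.Set.ofList sub.toList) : Int) = j - i then some sub else none))
  PySem.List.dedup subs

-- ===== PRECONDITION & SPEC =====
def Spec_solution (s : String) (out : List String) : Prop := out = solution_alt s
instance (s : String) (out : List String) : Decidable (Spec_solution s out) := by unfold Spec_solution; infer_instance

-- ===== CLAIM (what is proved, stated in full; the proofs are below) =====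
def Claim_equal_solution : Prop := ∀ (s : String), Dom_solution s → Spec_solution s (solution s)

-- ===== LEMMAS AND PROOFS =====

-- the common per-(i,k) step both programs reduce to (the substring is s[i : i+k+1])
def pvStep (cs : List Char) (i : Nat) (acc : List String) (k : Nat) : List String :=
  let sub := String.ofList ((cs.drop i).take (k + 1))
  if sub.toList.Nodup ∧ sub ∉ acc then acc ++ [sub] else acc

theorem pvSlice_eq (s : String) (i j : Nat) :
    PySem.Str.slice s (some (i : Int)) (some (j : Int)) =
      String.ofList ((s.toList.drop i).take (j - i)) := by
  rw [← String.toList_inj]; simp [PySem.List.slice_natCast]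

-- steps at non-distinct substrings are no-ops
theorem pvFoldl_id (cs : List Char) (i : Nat) (ks : List Nat) (acc : List String)
    (h : ∀ k ∈ ks, ¬ ((cs.drop i).take (k + 1)).Nodup) :
    ks.foldl (pvStep cs i) acc = acc := by
  induction ks generalizing acc with
  | nil => rfl
  | cons k ks ih =>
    have hstep : pvStep cs i acc k = acc := by
      simp only [pvStep]
      rw [if_neg]
      rintro ⟨h1, -⟩
      exact h k (by simp) (by simpa using h1)
    rw [List.foldl_cons, hstep]
    exact ih _ (fun k' hk' => h k' (by simp [hk']))

theorem pvInnerA_eq (s : String) (i m : Nat) (hi : i < s.toList.length)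
    (hm : i + m ≤ s.toList.length) (hnd : ((s.toList.drop i).take m).Nodup)
    (acc : List String) :
    solutionInner s (i : Int)
      (PySem.List.pyRange ((i + m + 1 : Nat) : Int) ((s.toList.length + 1 : Nat) : Int))
      (String.ofList ((s.toList.drop i).take m)) acc
    = (List.range' m (s.toList.length - i - m)).foldl (pvStep s.toList i) acc := by
  set cs := s.toList with hcs
  induction hfuel : cs.length - (i + m) generalizing m acc with
  | zero =>
    have hm' : i + m = cs.length := by omega
    have hrange : PySem.List.pyRange ((i + m + 1 : Nat) : Int) ((cs.length + 1 : Nat) : Int) = [] := by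
      rw [hm']; simp [PySem.List.pyRange]
    have hn : cs.length - i - m = 0 := by omega
    rw [hrange, hn]
    rfl
  | succ f ih =>
    have him : i + m < cs.length := by omega
    have hcons : PySem.List.pyRange ((i + m + 1 : Nat) : Int) ((cs.length + 1 : Nat) : Int)
        = ((i + m + 1 : Nat) : Int) :: PySem.List.pyRange (((i + m + 1 : Nat) : Int) + 1) ((cs.length + 1 : Nat) : Int) :=
      PySem.List.pyRange_one_cons (by push_cast; omega)
    rw [hcons]
    conv_lhs => rw [solutionInner]
    have hsub1 : ((i + m + 1 : Nat) : Int) - 1 = ((i + m : Nat) : Int) := by push_cast; ring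
    have hget : PySem.Str.pyGet? s (((i + m + 1 : Nat) : Int) - 1) = some (cs[i + m]'him) := by
      rw [hsub1, PySem.Str.pyGet?_natCast]
      exact List.getElem?_eq_getElem him
    rw [hget]
    simp only []
    set c := cs[i + m]'him with hc
    set T := (cs.drop i).take m with hT
    have hmlt : m < (cs.drop i).length := by simp [List.length_drop]; omega
    have hTc : (cs.drop i).take (m + 1) = T ++ [c] := by
      rw [List.take_add_one, hT]
      congr 1
      rw [List.getElem?_drop]
      simp [List.getElem?_eq_getElem him]
      exact hc.symm
    have hmem : PySem.Str.isIn (String.ofList [c]) (String.ofList T) = true ↔ c ∈ T := by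
      rw [PySem.Str.isIn_iff_infix]
      simp [List.singleton_infix_iff]
    by_cases hcT : c ∈ T
    · rw [if_pos (hmem.mpr hcT)]
      rw [pvFoldl_id]
      intro k hk
      have hmk : m ≤ k := (List.mem_range'_1.mp hk).1
      intro hnodup
      have hpre : (cs.drop i).take (m + 1) <+: (cs.drop i).take (k + 1) :=
        List.take_prefix_take_left (by omega)
      have : ((cs.drop i).take (m + 1)).Nodup := hnodup.sublist hpre.sublist
      rw [hTc, List.concat_eq_append.symm, List.nodup_concat] at this
      exact this.1 hcT
    · rw [if_neg (fun h => hcT (hmem.mp h))]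
      have hnd' : ((cs.drop i).take (m + 1)).Nodup := by
        rw [hTc, List.concat_eq_append.symm, List.nodup_concat]
        exact ⟨hcT, hnd⟩
      have hslice : PySem.Str.slice s (some (i : Int)) (some ((i + m + 1 : Nat) : Int)) =
          String.ofList ((cs.drop i).take (m + 1)) := by
        rw [pvSlice_eq]
        congr 2
        omega
      simp only [hslice]
      have hstep : (if String.ofList ((cs.drop i).take (m + 1)) ∉ acc
            then acc ++ [String.ofList ((cs.drop i).take (m + 1))] else acc)
          = pvStep cs i acc m := by
        simp only [pvStep, String.toList_ofList, hnd', true_and]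
      rw [hstep]
      have hcast : ((i + m + 1 : Nat) : Int) + 1 = ((i + (m + 1) + 1 : Nat) : Int) := by push_cast; ring
      rw [hcast]
      have := ih (m + 1) (pvStep cs i acc m) (by omega) hnd' (by omega)
      rw [this]
      have hrange' : List.range' m (cs.length - i - m) = m :: List.range' (m + 1) (cs.length - i - (m + 1)) := by
        have h1 : cs.length - i - m = (cs.length - i - (m + 1)) + 1 := by omega
        rw [h1, List.range'_succ]
      rw [hrange', List.foldl_cons]

-- `set` has full length exactly on duplicate-free lists
theorem pvOfList_append_one {α : Type} [BEq α] [LawfulBEq α] (l : List α) (x : α) :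
    PySem.Set.ofList (l ++ [x]) = PySem.Set.add (PySem.Set.ofList l) x := by
  simp [PySem.Set.ofList_eq_foldl, List.foldl_append]

theorem pvLenSet_iff {α : Type} [BEq α] [LawfulBEq α] (l : List α) :
    (PySem.Set.ofList l).length = l.length ↔ l.Nodup := by
  constructor
  · induction l using List.reverseRecOn with
    | nil => intro _; simp
    | append_singleton l x ih =>
      intro h
      rw [pvOfList_append_one] at h
      have hle := PySem.Set.length_ofList_le (xs := l)
      by_cases hx : x ∈ PySem.Set.ofList l
      · exfalso
        rw [show PySem.Set.add (PySem.Set.ofList l) x = PySem.Set.ofList l from by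
          simp only [PySem.Set.add]
          rw [if_pos ((PySem.Set.contains_iff _ _).mpr hx)]] at h
        simp only [List.length_append, List.length_cons, List.length_nil] at h
        omega
      · rw [show PySem.Set.add (PySem.Set.ofList l) x = PySem.Set.ofList l ++ [x] from by
          simp only [PySem.Set.add]
          rw [if_neg (fun hc => hx ((PySem.Set.contains_iff _ _).mp hc))]] at h
        simp only [List.length_append, List.length_cons, List.length_nil] at h
        have hnd := ih (by omega)
        rw [List.nodup_append]
        refine ⟨hnd, List.nodup_singleton x, ?_⟩
        intro a ha b hb
        rw [List.mem_singleton] at hb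
        subst hb
        exact fun he => hx ((PySem.Set.mem_ofList _ _).mpr (he ▸ ha))
  · intro h
    rw [PySem.Set.ofList_eq_self_of_nodup l h]

-- folding over a flatMap = nested folds
theorem pvFoldl_flatMap {α β γ : Type} (l : List α) (g : α → List β) (f : γ → β → γ) (init : γ) :
    (l.flatMap g).foldl f init = l.foldl (fun acc a => (g a).foldl f acc) init := by
  induction l generalizing init with
  | nil => rfl
  | cons a l ih => simp [List.flatMap_cons, List.foldl_append, ih]

-- folding first-occurrence dedup over a filtered list = folding the filtered step
theorem pvDedup_filter {α β : Type} [DecidableEq β] (ks : List α) (p : α → Prop) [DecidablePred p]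
    (f : α → β) (acc : List β) :
    ((ks.filterMap (fun k => if p k then some (f k) else none)).foldl
        (fun acc x => if x ∈ acc then acc else acc ++ [x]) acc)
      = ks.foldl (fun acc k => if p k ∧ f k ∉ acc then acc ++ [f k] else acc) acc := by
  induction ks generalizing acc with
  | nil => rfl
  | cons k ks ih =>
    rw [List.filterMap_cons, List.foldl_cons]
    by_cases hp : p k
    · rw [if_pos hp, List.foldl_cons]
      by_cases hm : f k ∈ acc
      · rw [if_pos hm, if_neg (by rintro ⟨-, h⟩; exact h hm)]
        exact ih acc
      · rw [if_neg hm, if_pos ⟨hp, hm⟩]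
        exact ih _
    · rw [if_neg hp, if_neg (by rintro ⟨h, -⟩; exact hp h)]
      exact ih acc

-- Set.add on strings is the first-occurrence dedup step
theorem pvAdd_eq (acc : List String) (x : String) :
    PySem.Set.add acc x = if x ∈ acc then acc else acc ++ [x] := by
  simp only [PySem.Set.add]
  by_cases hx : x ∈ acc
  · rw [if_pos ((PySem.Set.contains_iff _ _).mpr hx), if_pos hx]
  · rw [if_neg (fun hc => hx ((PySem.Set.contains_iff _ _).mp hc)), if_neg hx]

-- a duplicate-free list drawn from m is no longer than m's set of distinct elements
theorem pvNodupLenLe {α : Type} [DecidableEq α] [BEq α] [LawfulBEq α] (l m : List α)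
    (hnd : l.Nodup) (hsub : l ⊆ m) : l.length ≤ (PySem.Set.ofList m).length := by
  have h1 : l.length = l.toFinset.card := (List.toFinset_card_of_nodup hnd).symm
  have h2 : l.toFinset ⊆ (PySem.Set.ofList m).toFinset := by
    intro x hx
    rw [List.mem_toFinset] at hx ⊢
    exact (PySem.Set.mem_ofList _ _).mpr (hsub hx)
  have h3 : (PySem.Set.ofList m).toFinset.card = (PySem.Set.ofList m).length :=
    List.toFinset_card_of_nodup (PySem.Set.nodup_ofList _)
  calc l.length = l.toFinset.card := h1
    _ ≤ (PySem.Set.ofList m).toFinset.card := Finset.card_le_card h2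
    _ = (PySem.Set.ofList m).length := h3

-- B's inner filtered comprehension, folded through dedup, is the pvStep fold
theorem pvInnerB_eq (s : String) (i : Nat) (hi : i < s.toList.length) (acc : List String) :
    ((PySem.List.pyRange (((i : Nat) : Int) + 1)
        (min ((s.toList.length : Nat) : Int) (((i : Nat) : Int) + PySem.Set.len (PySem.Set.ofList s.toList)) + 1)).filterMap
        (fun j =>
          if (PySem.Set.len (PySem.Set.ofList (PySem.Str.slice s (some ((i : Nat) : Int)) (some j)).toList) : Int) = j - ((i : Nat) : Int)
          then some (PySem.Str.slice s (some ((i : Nat) : Int)) (some j)) else none)).foldl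
      (fun acc x => if x ∈ acc then acc else acc ++ [x]) acc
    = (List.range' 0 (s.toList.length - i)).foldl (pvStep s.toList i) acc := by
  set cs := s.toList with hcs
  set kN := (PySem.Set.ofList cs).length with hkN
  have hklen : PySem.Set.len (PySem.Set.ofList cs) = (kN : Int) := by
    simp [PySem.Set.len, hkN]
  set m := min (cs.length - i) kN with hm
  have hrange : PySem.List.pyRange (((i : Nat) : Int) + 1)
        (min ((cs.length : Nat) : Int) (((i : Nat) : Int) + PySem.Set.len (PySem.Set.ofList cs)) + 1)
      = (List.range m).map (fun k => ((i + 1 + k : Nat) : Int)) := by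
    rw [hklen, PySem.List.pyRange_one]
    have : ((min ((cs.length : Nat) : Int) (((i : Nat) : Int) + (kN : Int)) + 1) - (((i : Nat) : Int) + 1)).toNat = m := by
      rw [hm]; omega
    rw [this]
    apply List.map_congr_left
    intro k _
    push_cast; ring
  rw [hrange, List.filterMap_map]
  have hbody : ∀ k < m,
      ((fun j =>
          if (PySem.Set.len (PySem.Set.ofList (PySem.Str.slice s (some ((i : Nat) : Int)) (some j)).toList) : Int) = j - ((i : Nat) : Int)
          then some (PySem.Str.slice s (some ((i : Nat) : Int)) (some j)) else none) ∘
        (fun k => ((i + 1 + k : Nat) : Int))) k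
      = (fun k => if ((cs.drop i).take (k + 1)).Nodup
          then some (String.ofList ((cs.drop i).take (k + 1))) else none) k := by
    intro k hk
    have hkn : k < cs.length - i := lt_of_lt_of_le hk (by rw [hm]; omega)
    simp only [Function.comp]
    have hslice : PySem.Str.slice s (some ((i : Nat) : Int)) (some ((i + 1 + k : Nat) : Int))
        = String.ofList ((cs.drop i).take (k + 1)) := by
      rw [pvSlice_eq]; congr 2; omega
    rw [hslice]
    have hlen : ((cs.drop i).take (k + 1)).length = k + 1 := by
      simp [List.length_take, List.length_drop]; omega
    have hcond : ((PySem.Set.len (PySem.Set.ofList (String.ofList ((cs.drop i).take (k + 1))).toList) : Int)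
          = ((i + 1 + k : Nat) : Int) - ((i : Nat) : Int))
        ↔ ((cs.drop i).take (k + 1)).Nodup := by
      rw [String.toList_ofList, ← pvLenSet_iff ((cs.drop i).take (k + 1))]
      simp only [PySem.Set.len, hlen]
      omega
    by_cases hnd : ((cs.drop i).take (k + 1)).Nodup
    · rw [if_pos (hcond.mpr hnd), if_pos hnd]
    · rw [if_neg (fun h => hnd (hcond.mp h)), if_neg hnd]
  have hfm : (List.range m).filterMap
      ((fun j =>
          if (PySem.Set.len (PySem.Set.ofList (PySem.Str.slice s (some ((i : Nat) : Int)) (some j)).toList) : Int) = j - ((i : Nat) : Int)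
          then some (PySem.Str.slice s (some ((i : Nat) : Int)) (some j)) else none) ∘
        (fun k => ((i + 1 + k : Nat) : Int)))
      = (List.range m).filterMap
        (fun k => if ((cs.drop i).take (k + 1)).Nodup
          then some (String.ofList ((cs.drop i).take (k + 1))) else none) := by
    apply List.filterMap_congr
    intro k hk
    exact hbody k (List.mem_range.mp hk)
  rw [hfm, pvDedup_filter]
  have hstep : (fun (acc : List String) (k : Nat) =>
      if ((cs.drop i).take (k + 1)).Nodup ∧ String.ofList ((cs.drop i).take (k + 1)) ∉ acc
      then acc ++ [String.ofList ((cs.drop i).take (k + 1))] else acc) = pvStep cs i := by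
    funext acc k
    simp only [pvStep, String.toList_ofList]
  rw [hstep]
  -- extend the fold from the first m indices to all of them: the tail steps are no-ops,
  -- a substring longer than the number of distinct characters of cs cannot be duplicate-free
  have hsplit : List.range' 0 (cs.length - i) = List.range' 0 m ++ List.range' m (cs.length - i - m) := by
    have := @List.range'_append 0 m (cs.length - i - m) 1
    simp only [one_mul, Nat.zero_add] at this
    rw [this]
    congr 1
    rw [hm]; omega
  rw [hsplit, List.foldl_append, ← List.range_eq_range']
  have htail : (List.range' m (cs.length - i - m)).foldl (pvStep cs i)
      ((List.range m).foldl (pvStep cs i) acc) = (List.range m).foldl (pvStep cs i) acc := by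
    apply pvFoldl_id
    intro t ht hnodup
    have htm : m ≤ t ∧ t < cs.length - i := by
      have := List.mem_range'_1.mp ht
      omega
    have hlenle := pvNodupLenLe ((cs.drop i).take (t + 1)) cs hnodup
      (fun x hx => List.drop_subset i cs (List.take_subset _ _ hx))
    have hlen : ((cs.drop i).take (t + 1)).length = t + 1 := by
      simp [List.length_take, List.length_drop]; omega
    rw [hlen, ← hkN] at hlenle
    rw [hm] at htm
    omega
  rw [htail]

-- ===== VERDICT (by name: the statement is the Claim_ definition above) =====
theorem solution_spec : Claim_equal_solution := by
  intro s _
  show solution s = solution_alt s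
  unfold solution solution_alt
  simp only []
  rw [PySem.Str.len_eq, PySem.List.pyRange_zero_natCast, List.foldl_map]
  have hA : (List.range s.toList.length).foldl
      (fun answer k => solutionInner s ((k : Nat) : Int)
        (PySem.List.pyRange (((k : Nat) : Int) + 1) (((s.toList.length : Nat) : Int) + 1)) "" answer) []
      = (List.range s.toList.length).foldl
          (fun acc i => (List.range' 0 (s.toList.length - i)).foldl (pvStep s.toList i) acc) [] := by
    apply PySem.List.foldl_congr_mem
    intro acc i hi
    have hi' : i < s.toList.length := List.mem_range.mp hi
    have hc1 : ((i : Nat) : Int) + 1 = ((i + 0 + 1 : Nat) : Int) := by push_cast; ring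
    have hc2 : ((s.toList.length : Nat) : Int) + 1 = ((s.toList.length + 1 : Nat) : Int) := by push_cast; ring
    have hempty : ("" : String) = String.ofList ((s.toList.drop i).take 0) := by
      rw [← String.toList_inj]; simp
    rw [hc1, hc2, hempty]
    have h := pvInnerA_eq s i 0 hi' (by omega) (by simp) acc
    simpa using h
  rw [hA]
  -- B side
  rw [PySem.List.dedup_eq_ofList, PySem.Set.ofList_eq_foldl]
  have haddfun : (PySem.Set.add : PySem.Set String → String → PySem.Set String)
      = (fun acc x => if x ∈ acc then acc else acc ++ [x]) := by
    funext acc x; exact pvAdd_eq acc x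
  rw [haddfun, pvFoldl_flatMap, List.foldl_map]
  apply PySem.List.foldl_congr_mem
  intro acc i hi
  exact (pvInnerB_eq s i (List.mem_range.mp hi) acc).symm
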